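-- pv_equiv track=rewrite | github.com/heidelberg-hepml/MadAgents | src/madagents/backend/pricing.py | _normalize_model_key
-- ===== SOURCE A (Python) =====
-- from typing import Any, Optional
--
-- def _normalize_model_key(model: Optional[str], pricing: dict) -> Optional[str]:
--     if not isinstance(model, str) or not model.strip():
--         return None
--     normalized = model.strip()
--     if normalized.startswith("gpt-5") and "mini" in normalized:
--         normalized = "gpt-5-mini"
--     elif normalized.startswith("gpt-5") and "nano" in normalized:
--         normalized = "gpt-5-nano"
--     if normalized in pricing:
--         return normalized
--     candidates = [key for key in pricing.keys() if normalized.startswith(key)]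
--     if candidates:
--         return max(candidates, key=len)
--     return None
-- ===== SOURCE B (Python) =====
-- from typing import Any, Optional
--
-- def _normalize_model_key(model: Optional[str], pricing: dict) -> Optional[str]:
--     if not isinstance(model, str) or not model.strip():
--         return None
--     normalized = model.strip()
--     if normalized.startswith("gpt-5") and "mini" in normalized:
--         normalized = "gpt-5-mini"
--     elif normalized.startswith("gpt-5") and "nano" in normalized:
--         normalized = "gpt-5-nano"
--     max_len = max(map(len, pricing), default=0)
--     for i in range(min(len(normalized), max_len), -1, -1):
--         prefix = normalized[:i]
--         if prefix in pricing:
--             return prefix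
--     return None
-- ===== Notes on version B (the rewrite author's own statement) =====
-- stated objective: alternative
-- what changed: Instead of filtering all pricing keys for prefixes of the normalized name and taking the max by length (plus a separate exact-match check), B scans i from min(len(normalized), longest key length) down to 0 and returns the first prefix normalized[:i] found in the dict via O(1) lookups.
import Mathlib
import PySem

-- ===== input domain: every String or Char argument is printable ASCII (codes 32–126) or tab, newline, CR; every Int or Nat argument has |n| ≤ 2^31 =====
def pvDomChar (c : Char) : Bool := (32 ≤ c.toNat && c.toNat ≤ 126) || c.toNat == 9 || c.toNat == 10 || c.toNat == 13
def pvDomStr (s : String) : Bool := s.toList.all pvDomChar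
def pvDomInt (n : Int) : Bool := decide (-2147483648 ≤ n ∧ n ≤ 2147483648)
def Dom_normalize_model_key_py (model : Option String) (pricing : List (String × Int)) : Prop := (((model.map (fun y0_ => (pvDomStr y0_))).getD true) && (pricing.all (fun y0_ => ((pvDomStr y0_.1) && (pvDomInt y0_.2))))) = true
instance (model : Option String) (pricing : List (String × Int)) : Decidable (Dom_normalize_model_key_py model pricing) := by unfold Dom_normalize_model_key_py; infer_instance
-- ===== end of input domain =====

-- B replaces A's filter-all-keys + max-by-length (plus separate exact-match check) with a
-- descending scan over prefixes of the normalized name, capped at the longest key length,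
-- returning the first (longest) prefix that is a dict key (objective: alternative).

-- ===== PORT A =====
def normalize_model_key_py (model : Option String) (pricing : List (String × Int)) : Option String :=
  match model with
  | none => none
  | some m =>
    if PySem.Str.strip m = "" then none
    else
      let n0 := PySem.Str.strip m
      let normalized :=
        if PySem.Str.startswith n0 "gpt-5" && PySem.Str.isIn "mini" n0 then "gpt-5-mini"
        else if PySem.Str.startswith n0 "gpt-5" && PySem.Str.isIn "nano" n0 then "gpt-5-nano"
        else n0
      let d := PySem.Dict.ofList pricing
      if d.contains normalized then some normalized
      else
        let candidates := d.keys.filter (fun k => PySem.Str.startswith normalized k)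
        match PySem.List.max? candidates (fun k => PySem.Str.len k) with
        | some c => some c
        | none => none

-- ===== PORT B =====
-- B's 'for i in range(len(normalized), -1, -1): if normalized[:i] in pricing: return normalized[:i]'
def pvScanPrefix (d : PySem.Dict String Int) (cs : List Char) : Nat → Option String
  | 0 => if d.contains (String.ofList (cs.take 0)) then some (String.ofList (cs.take 0)) else none
  | i+1 => if d.contains (String.ofList (cs.take (i+1))) then some (String.ofList (cs.take (i+1)))
           else pvScanPrefix d cs i

def normalize_model_key_py_alt (model : Option String) (pricing : List (String × Int)) : Option String :=
  match model with
  | none => none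
  | some m =>
    if PySem.Str.strip m = "" then none
    else
      let n0 := PySem.Str.strip m
      let normalized :=
        if PySem.Str.startswith n0 "gpt-5" && PySem.Str.isIn "mini" n0 then "gpt-5-mini"
        else if PySem.Str.startswith n0 "gpt-5" && PySem.Str.isIn "nano" n0 then "gpt-5-nano"
        else n0
      let d := PySem.Dict.ofList pricing
      let maxLen := PySem.List.maxD (d.keys.map (fun k => PySem.Str.len k)) (fun y => y) 0
      pvScanPrefix d normalized.toList (min (PySem.Str.len normalized) maxLen).toNat

-- ===== PRECONDITION & SPEC =====
def Spec_normalize_model_key_py (model : Option String) (pricing : List (String × Int)) (out : Option String) : Prop := out = normalize_model_key_py_alt model pricing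
instance (model : Option String) (pricing : List (String × Int)) (out : Option String) : Decidable (Spec_normalize_model_key_py model pricing out) := by unfold Spec_normalize_model_key_py; infer_instance

-- ===== CLAIM (what is proved, stated in full; the proofs are below) =====
def Claim_equal_normalize_model_key_py : Prop := ∀ (model : Option String) (pricing : List (String × Int)), Dom_normalize_model_key_py model pricing → Spec_normalize_model_key_py model pricing (normalize_model_key_py model pricing)

-- ===== LEMMAS AND PROOFS =====

lemma pvScanPrefix_hit (d : PySem.Dict String Int) (cs : List Char) (j : Nat) :
    ∀ i, j ≤ i →
    d.contains (String.ofList (cs.take j)) = true →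
    (∀ j', j < j' → j' ≤ i → d.contains (String.ofList (cs.take j')) = false) →
    pvScanPrefix d cs i = some (String.ofList (cs.take j)) := by
  intro i
  induction i with
  | zero =>
    intro hj hmem _
    interval_cases j
    have h0 : d.contains "" = true := by simpa using hmem
    simp [pvScanPrefix, h0]
  | succ i ih =>
    intro hj hmem habove
    by_cases h : d.contains (String.ofList (cs.take (i+1))) = true
    · have hje : j = i + 1 := by
        by_contra hne
        have hlt : j < i + 1 := lt_of_le_of_ne hj hne
        have := habove (i+1) hlt (le_refl _)
        simp [this] at h
      subst hje
      simp [pvScanPrefix, h]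
    · have hji : j ≤ i := by
        rcases Nat.lt_or_ge j (i+1) with hlt | hge
        · omega
        · exfalso; have : j = i + 1 := le_antisymm hj hge; subst this; exact h hmem
      have := ih hji hmem (fun j' h1 h2 => habove j' h1 (Nat.le_succ_of_le h2))
      simp only [pvScanPrefix, Bool.not_eq_true] at *
      simp [h, this]

lemma pvScanPrefix_none (d : PySem.Dict String Int) (cs : List Char) :
    ∀ i, (∀ j, j ≤ i → d.contains (String.ofList (cs.take j)) = false) →
    pvScanPrefix d cs i = none := by
  intro i
  induction i with
  | zero =>
    intro h
    have h0 : d.contains "" = false := by simpa using h 0 (le_refl _)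
    simp [pvScanPrefix, h0]
  | succ i ih =>
    intro h
    simp [pvScanPrefix, h (i+1) (le_refl _), ih (fun j hj => h j (Nat.le_succ_of_le hj))]

lemma pv_startswith_iff (s p : String) : PySem.Str.startswith s p = true ↔ p.toList <+: s.toList := by
  rw [PySem.Str.startswith_eq]; exact PySem.Chars.startswith_iff _ _

-- the core of the equivalence: longest-matching-key lookup = descending prefix scan
lemma pv_key_lemma (normalized : String) (pricing : List (String × Int)) :
    (let d := PySem.Dict.ofList pricing
     if d.contains normalized then some normalized
     else
       match PySem.List.max? (d.keys.filter (fun k => PySem.Str.startswith normalized k))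
               (fun k => PySem.Str.len k) with
       | some c => some c
       | none => none)
    = pvScanPrefix (PySem.Dict.ofList pricing) normalized.toList
        (min (PySem.Str.len normalized)
          (PySem.List.maxD ((PySem.Dict.ofList pricing).keys.map (fun k => PySem.Str.len k)) (fun y => y) 0)).toNat := by
  set d := PySem.Dict.ofList pricing with hd
  set cs := normalized.toList with hcs
  set maxLen := PySem.List.maxD (d.keys.map (fun k => PySem.Str.len k)) (fun y => y) 0 with hml
  have hkeylen : ∀ k ∈ d.keys, (k.toList.length : Int) ≤ maxLen := by
    intro k hk
    have := PySem.List.le_maxD_id (d.keys.map (fun k => PySem.Str.len k)) 0 (PySem.Str.len k)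
      (List.mem_map_of_mem hk)
    rwa [PySem.Str.len_eq] at this
  have hN : (PySem.Str.len normalized) = (cs.length : Int) := by rw [PySem.Str.len_eq, hcs]
  by_cases hc : d.contains normalized = true
  · have hmk : String.ofList (cs.take cs.length) = normalized := by
      rw [List.take_length, hcs, String.ofList_toList]
    have hnlen : (cs.length : Int) ≤ maxLen := by
      have := hkeylen normalized ((PySem.Dict.contains_iff_mem_keys d normalized).mp hc)
      rwa [← hcs] at this
    have hminn : (min (PySem.Str.len normalized) maxLen).toNat = cs.length := by
      rw [hN]; omega
    rw [hminn, pvScanPrefix_hit d cs cs.length cs.length (le_refl _) (by rw [hmk]; exact hc)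
        (fun j' h1 h2 => absurd (lt_of_lt_of_le h1 h2) (lt_irrefl _))]
    rw [hmk]
    simp [hc]
  · simp only [hc, if_neg, Bool.false_eq_true, not_false_eq_true]
    cases hmax : PySem.List.max? (d.keys.filter (fun k => PySem.Str.startswith normalized k))
        (fun k => PySem.Str.len k) with
    | none =>
      have hnil := (PySem.List.max?_eq_none_iff _ _).mp hmax
      rw [pvScanPrefix_none]
      intro j hj
      by_contra hmem
      simp only [Bool.not_eq_false] at hmem
      have hkeys : String.ofList (cs.take j) ∈ d.keys :=
        (PySem.Dict.contains_iff_mem_keys d _).mp hmem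
      have hsw : PySem.Str.startswith normalized (String.ofList (cs.take j)) = true := by
        rw [pv_startswith_iff, String.toList_ofList, ← hcs]
        exact List.take_prefix j cs
      have : String.ofList (cs.take j) ∈
          d.keys.filter (fun k => PySem.Str.startswith normalized k) :=
        List.mem_filter.mpr ⟨hkeys, hsw⟩
      rw [hnil] at this
      exact absurd this (List.not_mem_nil)
    | some c =>
      have hcmem := PySem.List.max?_mem hmax
      have hckey : c ∈ d.keys := (List.mem_filter.mp hcmem).1
      have hcsw : c.toList <+: cs := by
        have := (List.mem_filter.mp hcmem).2
        rwa [pv_startswith_iff] at this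
      have hctake : c.toList = cs.take c.toList.length := List.prefix_iff_eq_take.mp hcsw
      have hjle : c.toList.length ≤ cs.length := hcsw.length_le
      have hcmk : String.ofList (cs.take c.toList.length) = c := by
        rw [← hctake, String.ofList_toList]
      have hjml : (c.toList.length : Int) ≤ maxLen := hkeylen c hckey
      have hmle : ((min (PySem.Str.len normalized) maxLen).toNat : Int) ≤ min (PySem.Str.len normalized) maxLen ⊔ 0 := by omega
      have hjle' : c.toList.length ≤ (min (PySem.Str.len normalized) maxLen).toNat := by
        rw [hN]; omega
      rw [pvScanPrefix_hit d cs c.toList.length ((min (PySem.Str.len normalized) maxLen).toNat) hjle'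
          (by rw [hcmk]; exact (PySem.Dict.contains_iff_mem_keys d c).mpr hckey)
          ?_ , hcmk]
      intro j' h1 h2
      by_contra hmem
      simp only [Bool.not_eq_false] at hmem
      have hkeys : String.ofList (cs.take j') ∈ d.keys :=
        (PySem.Dict.contains_iff_mem_keys d _).mp hmem
      have hsw : PySem.Str.startswith normalized (String.ofList (cs.take j')) = true := by
        rw [pv_startswith_iff, String.toList_ofList, ← hcs]
        exact List.take_prefix j' cs
      have hin : String.ofList (cs.take j') ∈
          d.keys.filter (fun k => PySem.Str.startswith normalized k) :=
        List.mem_filter.mpr ⟨hkeys, hsw⟩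
      have hle := PySem.List.max?_isMax hmax _ hin
      have hlen : PySem.Str.len (String.ofList (cs.take j')) = j' := by
        rw [PySem.Str.len_eq, String.toList_ofList, List.length_take]
        omega
      rw [hlen, PySem.Str.len_eq] at hle
      omega

-- ===== VERDICT (by name: the statement is the Claim_ definition above) =====
theorem normalize_model_key_py_spec : Claim_equal_normalize_model_key_py := by
  intro model pricing _
  unfold Spec_normalize_model_key_py
  cases model with
  | none => rfl
  | some m =>
    simp only [normalize_model_key_py, normalize_model_key_py_alt]
    by_cases h : PySem.Str.strip m = ""
    · simp [h]
    · simp only [h, if_neg, not_false_eq_true]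
      exact pv_key_lemma _ pricing
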